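-- pv_equiv track=rewrite | github.com/sid-code/mbpoker | mbpoker.py | to_lubinary_digits
-- ===== SOURCE A (Python) =====
-- def to_lubinary_digits(n, n_bits):
--     result = [0] * n_bits
--     i = 0
--     while n > 0 and i < n_bits:
--         result[i] = 1
--         n //= 2
--         i += 1
--     return result
-- ===== SOURCE B (Python) =====
-- def to_lubinary_digits(n, n_bits):
--     m = max(n_bits, 0)
--     k = min(n.bit_length(), m) if n > 0 else 0
--     return [1] * k + [0] * (m - k)
-- ===== Notes on version B (the rewrite author's own statement) =====
-- stated objective: simpler
-- what changed: Replaces the in-place index-assignment halving loop with a closed-form count k = min(bit_length(n), n_bits) and a two-segment list construction [1]*k + [0]*(n_bits-k).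
import Mathlib
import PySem

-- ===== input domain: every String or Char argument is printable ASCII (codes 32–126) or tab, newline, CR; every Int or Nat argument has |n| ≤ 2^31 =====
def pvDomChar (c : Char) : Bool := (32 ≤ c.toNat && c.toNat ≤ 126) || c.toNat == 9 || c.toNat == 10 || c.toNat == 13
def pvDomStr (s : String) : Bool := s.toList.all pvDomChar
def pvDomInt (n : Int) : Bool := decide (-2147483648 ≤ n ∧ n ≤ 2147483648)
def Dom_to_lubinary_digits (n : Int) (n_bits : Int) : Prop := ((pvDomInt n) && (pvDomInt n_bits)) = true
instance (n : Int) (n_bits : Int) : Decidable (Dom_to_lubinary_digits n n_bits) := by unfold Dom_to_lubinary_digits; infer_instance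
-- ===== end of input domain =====

-- B replaces A's index-assignment halving loop with a closed-form count k = min(bit_length(n), n_bits)
-- and a two-segment list construction; objective: simpler.

-- ===== PORT A =====
-- while n > 0 and i < n_bits: result[i] = 1; n //= 2; i += 1
def luLoop (n : Int) (i : Int) (n_bits : Int) (result : List Int) : List Int :=
  if n > 0 ∧ i < n_bits then
    luLoop (PySem.Int.floordiv n 2) (i + 1) n_bits (result.set i.toNat 1)
  else
    result
termination_by (n_bits - i).toNat
decreasing_by omega

def to_lubinary_digits (n : Int) (n_bits : Int) : List Int :=
  luLoop n 0 n_bits (List.replicate n_bits.toNat 0)   -- result = [0] * n_bits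

-- ===== PORT B =====
def to_lubinary_digits_alt (n : Int) (n_bits : Int) : List Int :=
  let m : Int := max n_bits 0
  let k : Int := if n > 0 then min ((PySem.Int.bitLength n : Nat) : Int) m else 0
  List.replicate k.toNat 1 ++ List.replicate (m - k).toNat 0

-- ===== PRECONDITION & SPEC =====
def Spec_to_lubinary_digits (n : Int) (n_bits : Int) (out : List Int) : Prop := out = to_lubinary_digits_alt n n_bits
instance (n : Int) (n_bits : Int) (out : List Int) : Decidable (Spec_to_lubinary_digits n n_bits out) := by unfold Spec_to_lubinary_digits; infer_instance

-- ===== CLAIM (what is proved, stated in full; the proofs are below) =====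
def Claim_equal_to_lubinary_digits : Prop := ∀ (n : Int) (n_bits : Int), Dom_to_lubinary_digits n n_bits → Spec_to_lubinary_digits n n_bits (to_lubinary_digits n n_bits)

-- ===== LEMMAS AND PROOFS =====

-- setting position a of (replicate a 1 ++ replicate (b+1) 0) to 1 grows the 1-prefix
lemma set_replicate_step (a b : Nat) :
    (List.replicate a (1 : Int) ++ List.replicate (b + 1) 0).set a 1
      = List.replicate (a + 1) (1 : Int) ++ List.replicate b 0 := by
  induction a with
  | zero => simp [List.replicate_succ]
  | succ a ih =>
      simp only [List.replicate_succ, List.cons_append, List.set_cons_succ]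
      rw [← List.replicate_succ, ih]
      simp [List.replicate_succ]

-- loop invariant: starting from i with the first i slots already 1, the loop
-- produces exactly min (i + bitLength n) m ones (m = max n_bits 0)
lemma luLoop_eq (N : Nat) : ∀ (n i n_bits : Int), n.toNat = N → 0 ≤ i → i ≤ max n_bits 0 →
    luLoop n i n_bits (List.replicate i.toNat 1 ++ List.replicate (max n_bits 0 - i).toNat 0)
      = (let k : Int := if n > 0 then min (i + ((PySem.Int.bitLength n : Nat) : Int)) (max n_bits 0) else i
         List.replicate k.toNat 1 ++ List.replicate (max n_bits 0 - k).toNat 0) := by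
  induction N using Nat.strong_induction_on with
  | _ N ih =>
    intro n i n_bits hN hi him
    rw [luLoop]
    by_cases h : n > 0 ∧ i < n_bits
    · simp only [h, if_pos]
      obtain ⟨hn, hib⟩ := h
      have him' : i < max n_bits 0 := by omega
      -- set step
      have hset : (List.replicate i.toNat (1 : Int) ++ List.replicate (max n_bits 0 - i).toNat 0).set i.toNat 1
          = List.replicate (i + 1).toNat 1 ++ List.replicate (max n_bits 0 - (i + 1)).toNat 0 := by
        have hb : (max n_bits 0 - i).toNat = (max n_bits 0 - (i + 1)).toNat + 1 := by omega
        rw [hb, set_replicate_step]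
        congr 1
        congr 1
        omega
      rw [hset]
      have hfd : (PySem.Int.floordiv n 2).toNat = n.toNat / 2 := by
        rw [PySem.Int.floordiv_eq_ediv_of_pos (by omega)]
        omega
      have hlt : n.toNat / 2 < N := by omega
      have h0 : (0:Int) ≤ PySem.Int.floordiv n 2 := by
        rw [PySem.Int.floordiv_eq_ediv_of_pos (by omega)]; omega
      rw [ih (n.toNat / 2) hlt (PySem.Int.floordiv n 2) (i + 1) n_bits hfd (by omega) (by omega)]
      by_cases hn2 : PySem.Int.floordiv n 2 > 0
      · have hbl := PySem.Int.bitLength_of_pos (n := n) hn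
        simp only [hn2, if_true, hbl]
        have : i + 1 + ((PySem.Int.bitLength (PySem.Int.floordiv n 2) : Nat) : Int)
            = i + (((PySem.Int.bitLength (PySem.Int.floordiv n 2) + 1 : Nat)) : Int) := by push_cast; ring
        rw [this]
        simp
      · -- n // 2 = 0, i.e. n = 1, bitLength n = 1
        have hn1 : n = 1 := by
          rw [PySem.Int.floordiv_eq_ediv_of_pos (by omega)] at hn2
          omega
        subst hn1
        have hbl1 : PySem.Int.bitLength 1 = 1 := by decide
        simp only [hn2, if_false, hbl1]
        have hmin : min (i + ((1 : Nat) : Int)) (max n_bits 0) = i + 1 := by push_cast; omega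
        simp only [hmin]
        simp
    · simp only [h, if_false]
      have : (if n > 0 then min (i + ((PySem.Int.bitLength n : Nat) : Int)) (max n_bits 0) else i) = i := by
        by_cases hn : n > 0
        · have hbl : 1 ≤ (PySem.Int.bitLength n : Int) := by
            have := PySem.Int.lt_two_pow_bitLength n
            by_contra hc
            have : PySem.Int.bitLength n = 0 := by omega
            simp [this] at *
            omega
          have : i ≥ n_bits := by
            rcases not_and_or.mp h with h1 | h2
            · omega
            · omega
          simp only [hn, if_true]
          omega
        · simp [hn]
      rw [this]

-- ===== VERDICT (by name: the statement is the Claim_ definition above) =====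
theorem to_lubinary_digits_spec : Claim_equal_to_lubinary_digits := by
  intro n n_bits _
  unfold Spec_to_lubinary_digits to_lubinary_digits to_lubinary_digits_alt
  have h0 : List.replicate n_bits.toNat (0 : Int)
      = List.replicate (Int.toNat 0) (1 : Int) ++ List.replicate (max n_bits 0 - 0).toNat 0 := by
    simp
    omega
  rw [h0, luLoop_eq n.toNat n 0 n_bits rfl (by omega) (by omega)]
  simp
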